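-- pv_equiv track=rewrite | github.com/jackbodine/Drunk-Philosophers | main.py | findFirstLetter
-- ===== SOURCE A (Python) =====
-- def findFirstLetter(string):
--     i = 0
--     letters = ["A","B","C","D","E","F","G","H","I","J","K","L","M","N","O","P","Q","R","S","T","U","V","W","X","Y","Z",
--     "a","b","c","d","e","f","g","h","i","j","k","l","m","n","o","p","q","r","s","t","u","v","w","x","y","z"] # Evan did this
--     for char in string:
--         if char in letters:
--             return i
--
--         i = i + 1
--
--     return 0
-- ===== SOURCE B (Python) =====
-- def findFirstLetter(string):
--     # Right-to-left scan with an accumulator: walk the string backwards, and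
--     # whenever a letter is seen, record its index; the last one recorded is the
--     # leftmost letter. No early return; 0 stays when no letter occurs.
--     result = 0
--     for i in range(len(string) - 1, -1, -1):
--         c = string[i]
--         if 'A' <= c <= 'Z' or 'a' <= c <= 'z':
--             result = i
--     return result
-- ===== Notes on version B (the rewrite author's own statement) =====
-- stated objective: alternative
-- what changed: Replaces A's forward scan with early return and a 52-element list membership test by a backwards traversal (range(len-1,-1,-1)) that keeps overwriting an accumulator with each letter index seen, so the leftmost letter index (or the initial 0) remains at the end; letters are recognized by two character-range comparisons instead of list membership.
import Mathlib
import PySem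

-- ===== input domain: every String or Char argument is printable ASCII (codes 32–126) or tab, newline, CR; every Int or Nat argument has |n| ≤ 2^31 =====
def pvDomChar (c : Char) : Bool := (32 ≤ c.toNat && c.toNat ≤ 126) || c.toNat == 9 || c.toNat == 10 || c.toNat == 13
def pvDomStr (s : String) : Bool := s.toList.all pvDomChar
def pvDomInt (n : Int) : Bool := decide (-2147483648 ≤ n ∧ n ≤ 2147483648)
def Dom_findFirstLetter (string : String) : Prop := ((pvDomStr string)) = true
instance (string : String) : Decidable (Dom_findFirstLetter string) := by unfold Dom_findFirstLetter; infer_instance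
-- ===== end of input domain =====

-- B replaces A's forward scan with early return by a backwards index loop that keeps
-- overwriting an accumulator with each letter index seen (alternative decomposition).

-- ===== PORT A =====
def pvLetters : List Char :=
  ['A','B','C','D','E','F','G','H','I','J','K','L','M','N','O','P','Q','R','S','T','U','V','W','X','Y','Z',
   'a','b','c','d','e','f','g','h','i','j','k','l','m','n','o','p','q','r','s','t','u','v','w','x','y','z']

def findFirstLetterGo (i : Int) : List Char → Int
  | [] => 0
  | c :: rest => if pvLetters.contains c then i else findFirstLetterGo (i + 1) rest

def findFirstLetter (string : String) : Int := findFirstLetterGo 0 string.toList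

-- ===== PORT B =====
-- 'A' <= c <= 'Z' or 'a' <= c <= 'z'
def pvIsLetter (c : Char) : Bool := ('A' ≤ c && c ≤ 'Z') || ('a' ≤ c && c ≤ 'z')

-- the backwards for-loop: range(len(string)-1, -1, -1), accumulator starts at 0
def findFirstLetter_alt (string : String) : Int :=
  (PySem.List.pyRange ((string.toList.length : Int) - 1) (-1) (-1)).foldl
    (fun result i =>
      if pvIsLetter (PySem.List.pyGetD string.toList i ' ') then i else result) 0

-- ===== PRECONDITION & SPEC =====
def Spec_findFirstLetter (string : String) (out : Int) : Prop := out = findFirstLetter_alt string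
instance (string : String) (out : Int) : Decidable (Spec_findFirstLetter string out) := by unfold Spec_findFirstLetter; infer_instance

-- ===== CLAIM =====
def Claim_equal_findFirstLetter : Prop := ∀ (string : String), Dom_findFirstLetter string → Spec_findFirstLetter string (findFirstLetter string)

-- ===== LEMMAS AND PROOFS =====

lemma contains_eq_isLetter (c : Char) : pvLetters.contains c = pvIsLetter c := by
  have h1 : pvLetters.contains c = true ↔
      ((65 ≤ c.toNat ∧ c.toNat ≤ 90) ∨ (97 ≤ c.toNat ∧ c.toNat ≤ 122)) := by
    constructor
    · intro h
      have hm : c ∈ pvLetters := by simpa using h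
      fin_cases hm <;> decide
    · intro h
      have hc : c = Char.ofNat c.toNat := (Char.ofNat_toNat c).symm
      have hlt : c.toNat < 123 := by omega
      rw [hc]
      interval_cases h : c.toNat <;> first | decide | omega
  have h2 : pvIsLetter c = true ↔
      ((65 ≤ c.toNat ∧ c.toNat ≤ 90) ∨ (97 ≤ c.toNat ∧ c.toNat ≤ 122)) := by
    simp only [pvIsLetter, Bool.or_eq_true, Bool.and_eq_true, decide_eq_true_eq,
      Char.le_def, UInt32.le_iff_toNat_le]
    rfl
  cases hb : pvIsLetter c
  · cases hb' : pvLetters.contains c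
    · rfl
    · exact absurd (h2.mpr (h1.mp hb')) (by simp [hb])
  · exact h1.mpr (h2.mp hb)

-- A's scan characterised by findIdx?
lemma go_eq (cs : List Char) : ∀ (i : Int),
    findFirstLetterGo i cs =
      (match cs.findIdx? pvIsLetter with
       | some n => i + (n : Int)
       | none => 0) := by
  induction cs with
  | nil => intro i; simp [findFirstLetterGo]
  | cons c rest ih =>
    intro i
    rw [findFirstLetterGo, contains_eq_isLetter, List.findIdx?_cons]
    cases hp : pvIsLetter c
    · simp only [hp, ih (i + 1)]
      cases h : rest.findIdx? pvIsLetter <;> simp <;> ring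
    · simp [hp]

-- B's right fold over the enumerated list characterised by findIdx?
lemma foldr_enum_eq (cs : List Char) : ∀ (s : Int),
    (PySem.List.enumerate cs s).foldr
        (fun p result => if pvIsLetter p.2 then p.1 else result) 0 =
      (match cs.findIdx? pvIsLetter with
       | some n => s + (n : Int)
       | none => 0) := by
  induction cs with
  | nil => intro s; simp [PySem.List.enumerate_nil]
  | cons c rest ih =>
    intro s
    rw [PySem.List.enumerate_cons, List.foldr_cons, List.findIdx?_cons]
    cases hp : pvIsLetter c
    · simp only [hp, ih (s + 1)]
      cases h : rest.findIdx? pvIsLetter <;> simp <;> ring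
    · simp [hp]

-- B's backwards foldl rewritten as the foldr over enumerate
lemma alt_eq (string : String) :
    findFirstLetter_alt string =
      (PySem.List.enumerate string.toList 0).foldr
        (fun p result => if pvIsLetter p.2 then p.1 else result) 0 := by
  unfold findFirstLetter_alt
  have hr : PySem.List.pyRange ((string.toList.length : Int) - 1) (-1) (-1)
      = (PySem.List.pyRange 0 (string.toList.length : Int) 1).reverse := by
    have := PySem.List.pyRange_neg_one_eq_reverse ((string.toList.length : Int) - 1) (-1)
    simpa using this
  rw [hr, List.foldl_reverse,
    PySem.List.enumerate_eq_map_pyRange string.toList ' ', List.foldr_map]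
  simp [PySem.List.len]

-- ===== VERDICT =====
theorem findFirstLetter_spec : Claim_equal_findFirstLetter := by
  intro s _
  show findFirstLetter s = findFirstLetter_alt s
  rw [findFirstLetter, findFirstLetter_alt.eq_def, go_eq]
  rw [← findFirstLetter_alt.eq_def, alt_eq, foldr_enum_eq]
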